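-- pv_equiv track=rewrite | github.com/torbenpfohl/db | analyse.py | nextPartialCity
-- ===== SOURCE A (Python) =====
-- import string
--
-- def nextPartialCity(lastPartialCity):
--   letters = string.ascii_lowercase + " _"
--   if lastPartialCity == "":
--     return letters[0]
--   nextPartialCity = ""
--   flag = 0
--   lastPartialCityReversed = "".join([i for i in reversed(lastPartialCity)])
--   for index, letter in enumerate(lastPartialCityReversed):
--     if letter == letters[-1]:
--       nextPartialCity += letters[0]
--       flag = 1
--     else:
--       nextPartialCity += letters[letters.find(letter) + 1] + lastPartialCityReversed[index+1:]
--       flag = 0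
--       break
--   if flag == 1:
--     nextPartialCity = letters[0] + nextPartialCity
--   nextPartialCity = "".join([i for i in reversed(nextPartialCity)])
--   return nextPartialCity
-- ===== SOURCE B (Python) =====
-- import string
--
-- def nextPartialCity(lastPartialCity):
--   letters = string.ascii_lowercase + " _"
--   core = lastPartialCity.rstrip(letters[-1])
--   if not core:
--     return letters[0] * (len(lastPartialCity) + 1)
--   return core[:-1] + letters[letters.find(core[-1]) + 1] + letters[0] * (len(lastPartialCity) - len(core))
-- ===== Notes on version B (the rewrite author's own statement) =====
-- stated objective: simpler
-- what changed: Replaces A's reverse / char-by-char carry loop / un-reverse with a direct decomposition: rstrip the trailing run of the carry character, bump the last remaining character, pad with copies of the first alphabet character; empty core handled by one closed-form case.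
import Mathlib
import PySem

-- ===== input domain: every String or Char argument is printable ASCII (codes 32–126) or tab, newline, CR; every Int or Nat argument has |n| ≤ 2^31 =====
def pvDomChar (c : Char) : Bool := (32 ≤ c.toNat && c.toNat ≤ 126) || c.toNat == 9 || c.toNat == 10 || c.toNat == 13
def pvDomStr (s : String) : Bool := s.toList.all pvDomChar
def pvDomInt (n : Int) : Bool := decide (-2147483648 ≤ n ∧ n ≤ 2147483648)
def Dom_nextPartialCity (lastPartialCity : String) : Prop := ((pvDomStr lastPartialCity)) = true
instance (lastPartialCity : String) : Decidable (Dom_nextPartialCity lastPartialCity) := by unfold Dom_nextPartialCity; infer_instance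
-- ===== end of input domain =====

-- B replaces A's reverse + char-by-char carry loop + un-reverse by a direct decomposition:
-- strip the trailing '_' run, bump the last remaining char, pad with 'a's (objective: simpler).

-- letters = string.ascii_lowercase + " _"  (shared constant of both Pythons)
def pvLetters : List Char := "abcdefghijklmnopqrstuvwxyz _".toList

-- letters[letters.find(c) + 1]: both Pythons' increment expression.  The index is provably in
-- range wherever either program evaluates it (c ≠ '_', so find ≤ 26), so .getD is never taken.
def pvIncChar (c : Char) : Char :=
  (PySem.List.pyGet? pvLetters (PySem.Chars.find pvLetters [c] + 1)).getD 'a'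

-- ===== PORT A =====
-- A's for-loop over the reversed string: accumulate 'a' per '_' (flag stays 1), else bump and
-- append the rest of the reversed string and break (flag 0).
def nextPartialCityGo : List Char → List Char → List Char × Bool
  | [], acc => (acc, true)
  | c :: rest, acc =>
    if c == '_' then nextPartialCityGo rest (acc ++ ['a'])
    else (acc ++ pvIncChar c :: rest, false)

def nextPartialCity (lastPartialCity : String) : String :=
  if lastPartialCity = "" then "a"
  else
    let rev := lastPartialCity.toList.reverse
    let r := nextPartialCityGo rev []
    let res := if r.2 then 'a' :: r.1 else r.1
    String.mk res.reverse

-- ===== PORT B =====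
def nextPartialCity_alt (lastPartialCity : String) : String :=
  let cs := lastPartialCity.toList
  -- core = lastPartialCity.rstrip('_')  (hand-ported: drop the trailing run of '_'; exact)
  let core := (cs.reverse.dropWhile (· == '_')).reverse
  if core = [] then String.mk (List.replicate (cs.length + 1) 'a')
  else
    -- core[:-1] = dropLast; core[-1] = getLast (core ≠ [], so the default is never taken)
    String.mk (core.dropLast ++ pvIncChar (core.getLast?.getD 'a')
               :: List.replicate (cs.length - core.length) 'a')

-- ===== PRECONDITION & SPEC =====
def Spec_nextPartialCity (lastPartialCity : String) (out : String) : Prop := out = nextPartialCity_alt lastPartialCity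
instance (lastPartialCity : String) (out : String) : Decidable (Spec_nextPartialCity lastPartialCity out) := by unfold Spec_nextPartialCity; infer_instance

-- ===== CLAIM (what is proved, stated in full; the proofs are below) =====
def Claim_equal_nextPartialCity : Prop := ∀ (lastPartialCity : String), Dom_nextPartialCity lastPartialCity → Spec_nextPartialCity lastPartialCity (nextPartialCity lastPartialCity)

-- ===== LEMMAS AND PROOFS =====

-- A's loop, characterised by the leading '_'-run of its (reversed) input.
theorem nextPartialCityGo_spec (l : List Char) : ∀ acc : List Char,
    nextPartialCityGo l acc =
      match l.dropWhile (· == '_') with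
      | [] => (acc ++ List.replicate l.length 'a', true)
      | c :: rest =>
          (acc ++ List.replicate (l.takeWhile (· == '_')).length 'a' ++ pvIncChar c :: rest,
           false) := by
  induction l with
  | nil => intro acc; simp [nextPartialCityGo]
  | cons c rest ih =>
    intro acc
    by_cases h : c == '_'
    · rcases hd : rest.dropWhile (· == '_') with _ | ⟨d, ds⟩ <;>
        simp [nextPartialCityGo, h, ih, hd, List.replicate_succ]
    · simp [nextPartialCityGo, h]

theorem nextPartialCity_spec' (s : String) :
    nextPartialCity s = nextPartialCity_alt s := by
  by_cases hs : s = ""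
  · subst hs; decide
  · simp only [nextPartialCity, nextPartialCity_alt, if_neg hs]
    rw [nextPartialCityGo_spec]
    rcases hd : s.toList.reverse.dropWhile (· == '_') with _ | ⟨c, rest⟩
    · -- all chars are '_': result is 'a' * (len+1)
      simp only [List.reverse_nil, List.length_reverse]
      simp [List.reverse_replicate, ← List.replicate_succ]
    · -- core = rest.reverse ++ [c]
      have hsplit : s.toList.reverse.takeWhile (· == '_') ++ (c :: rest)
          = s.toList.reverse := by
        rw [← hd]; exact List.takeWhile_append_dropWhile
      simp only []
      have hne : (c :: rest).reverse ≠ [] := by simp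
      rw [if_neg hne]
      have hlast : (c :: rest).reverse.getLast?.getD 'a' = c := by
        simp [List.getLast?_reverse]
      have hdl : (c :: rest).reverse.dropLast = rest.reverse := by
        simp [List.reverse_cons]
      have hlen : s.toList.length - (c :: rest).reverse.length
          = (s.toList.reverse.takeWhile (· == '_')).length := by
        have := congrArg List.length hsplit
        simp only [List.length_append, List.length_cons, List.length_reverse] at this ⊢
        omega
      rw [hlast, hdl, hlen]
      simp [List.reverse_append, List.reverse_replicate]

-- ===== VERDICT (by name: the statement is the Claim_ definition above) =====
theorem nextPartialCity_spec : Claim_equal_nextPartialCity := by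
  intro s _
  exact nextPartialCity_spec' s
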